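-- pv_equiv track=rewrite | github.com/jlutrera/Advent-of-Code-2025 | 2024/D09/p9_2.py | measure_free_spaces
-- ===== SOURCE A (Python) =====
-- def measure_free_spaces(blocks):
--     """Identify and measure free spaces in the disk map."""
--     free_spaces = []
--     start = None
--     for i, block in enumerate(blocks):
--         if block == ".":
--             if start is None:
--                 start = i
--         else:
--             if start is not None:
--                 free_spaces.append((start, i - start))  # (start, length)
--                 start = None
--     if start is not None:  # Handle trailing free space
--         free_spaces.append((start, len(blocks) - start))
--     return free_spaces
-- ===== SOURCE B (Python) =====
-- def measure_free_spaces(blocks):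
--     """Identify and measure free spaces in the disk map."""
--     free_spaces = []
--     n = len(blocks)
--     i = 0
--     while i < n:
--         j = i + 1
--         while j < n and blocks[j] == blocks[i]:
--             j += 1
--         if blocks[i] == ".":
--             free_spaces.append((i, j - i))
--         i = j
--     return free_spaces
-- ===== Notes on version B (the rewrite author's own statement) =====
-- stated objective: alternative
-- what changed: Replaces A's element-by-element state machine (Optional start sentinel plus a trailing-run fixup after the loop) with a run-scanning two-pointer loop over maximal runs of equal blocks, emitting each free run directly with no sentinel or post-loop patch.
import Mathlib
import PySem

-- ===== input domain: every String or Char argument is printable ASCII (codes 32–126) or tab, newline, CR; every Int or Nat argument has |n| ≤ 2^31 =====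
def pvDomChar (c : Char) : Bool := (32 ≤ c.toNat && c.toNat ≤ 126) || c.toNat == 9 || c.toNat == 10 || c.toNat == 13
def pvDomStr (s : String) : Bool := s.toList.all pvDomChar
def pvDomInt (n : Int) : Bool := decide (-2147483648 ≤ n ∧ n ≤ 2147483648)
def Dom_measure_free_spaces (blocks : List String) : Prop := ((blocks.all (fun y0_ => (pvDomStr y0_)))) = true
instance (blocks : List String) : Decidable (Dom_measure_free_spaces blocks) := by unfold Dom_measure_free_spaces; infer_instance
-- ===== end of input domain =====

-- B replaces A's sentinel state machine (Optional start + trailing fixup) with a run-scanning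
-- two-pointer loop over maximal runs of equal blocks; same O(n) cost, no sentinel, no post-loop patch.

-- ===== PORT A =====
-- loop body of A's `for i, block in enumerate(blocks)`: state = (free_spaces, start)
def pvStepA (acc : List (Int × Int) × Option Int) (ib : Int × String) : List (Int × Int) × Option Int :=
  if ib.2 == "." then
    match acc.2 with
    | none => (acc.1, some ib.1)
    | some _ => acc
  else
    match acc.2 with
    | some s => (acc.1 ++ [(s, ib.1 - s)], none)
    | none => acc

def measure_free_spaces (blocks : List String) : List (Int × Int) :=
  let p := (PySem.List.enumerate blocks).foldl pvStepA ([], none)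
  match p.2 with
  | some s => p.1 ++ [(s, (blocks.length : Int) - s)]  -- trailing free space
  | none => p.1

-- ===== PORT B =====
-- outer `while i < n` of Source B: scan the maximal run of blocks equal to the head
-- (the inner `while j < n and blocks[j] == blocks[i]` scan = takeWhile/dropWhile), emit if free.
def pvAltGo (xs : List String) (off : Int) : List (Int × Int) :=
  match xs with
  | [] => []
  | b :: rest =>
    let len : Int := 1 + (rest.takeWhile (· == b)).length
    let tail := rest.dropWhile (· == b)
    if b == "." then (off, len) :: pvAltGo tail (off + len)
    else pvAltGo tail (off + len)
termination_by xs.length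
decreasing_by
  all_goals simpa using Nat.lt_succ_of_le (List.length_dropWhile_le (· == b) rest)

def measure_free_spaces_alt (blocks : List String) : List (Int × Int) :=
  pvAltGo blocks 0

-- ===== PRECONDITION & SPEC =====
def Spec_measure_free_spaces (blocks : List String) (out : List (Int × Int)) : Prop := out = measure_free_spaces_alt blocks
instance (blocks : List String) (out : List (Int × Int)) : Decidable (Spec_measure_free_spaces blocks out) := by unfold Spec_measure_free_spaces; infer_instance

-- ===== CLAIM (what is proved, stated in full; the proofs are below) =====
def Claim_equal_measure_free_spaces : Prop := ∀ (blocks : List String), Dom_measure_free_spaces blocks → Spec_measure_free_spaces blocks (measure_free_spaces blocks)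

-- ===== LEMMAS AND PROOFS =====

-- mid-level spec: A's state machine written as plain structural recursion (proof-only)
def pvMach : List String → Int → Option Int → List (Int × Int)
  | [], i, some s => [(s, i - s)]
  | [], _, none => []
  | b :: rest, i, st =>
    if b == "." then
      match st with
      | none => pvMach rest (i + 1) (some i)
      | some _ => pvMach rest (i + 1) st
    else
      match st with
      | some s => (s, i - s) :: pvMach rest (i + 1) none
      | none => pvMach rest (i + 1) none

-- A's fold, with the trailing fixup, computes pvMach
theorem pvFold_eq_mach (xs : List String) : ∀ (i : Int) (fs : List (Int × Int)) (st : Option Int),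
    (match ((PySem.List.enumerate xs i).foldl pvStepA (fs, st)) with
     | (l, some s) => l ++ [(s, (i + (xs.length : Int)) - s)]
     | (l, none) => l) = fs ++ pvMach xs i st := by
  induction xs with
  | nil =>
    intro i fs st
    cases st <;> simp [PySem.List.enumerate, pvMach]
  | cons b rest ih =>
    intro i fs st
    rw [PySem.List.enumerate_cons]
    simp only [List.foldl_cons]
    have hlen : (i + ((b :: rest).length : Int)) = ((i + 1) + (rest.length : Int)) := by
      simp; ring
    rw [hlen]
    by_cases hb : (b == ".") = true
    · cases st with
      | none =>
        rw [show pvStepA (fs, none) (i, b) = (fs, some i) by simp [pvStepA, hb]]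
        rw [ih (i + 1) fs (some i)]
        simp [pvMach, hb]
      | some s =>
        rw [show pvStepA (fs, some s) (i, b) = (fs, some s) by simp [pvStepA, hb]]
        rw [ih (i + 1) fs (some s)]
        simp [pvMach, hb]
    · cases st with
      | none =>
        rw [show pvStepA (fs, none) (i, b) = (fs, none) by simp [pvStepA, hb]]
        rw [ih (i + 1) fs none]
        simp [pvMach, hb]
      | some s =>
        rw [show pvStepA (fs, some s) (i, b) = (fs ++ [(s, i - s)], none) by simp [pvStepA, hb]]
        rw [ih (i + 1) (fs ++ [(s, i - s)]) none]
        simp [pvMach, hb]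

theorem measure_free_spaces_eq_mach (blocks : List String) :
    measure_free_spaces blocks = pvMach blocks 0 none := by
  have h := pvFold_eq_mach blocks 0 [] none
  rcases hp : (PySem.List.enumerate blocks).foldl pvStepA ([], none) with ⟨l, st⟩
  rw [hp] at h
  cases st <;> simp_all [measure_free_spaces]

-- pvMach skips a prefix of non-dot blocks in the `none` state
theorem pvMach_skip_nondots : ∀ (pre : List String), (∀ x ∈ pre, (x == ".") = false) →
    ∀ (tail : List String) (i : Int),
    pvMach (pre ++ tail) i none = pvMach tail (i + (pre.length : Int)) none := by
  intro pre
  induction pre with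
  | nil => intro _ tail i; simp
  | cons d pre' ih =>
    intro h tail i
    have hd : (d == ".") = false := h d (by simp)
    have step : pvMach ((d :: pre') ++ tail) i none = pvMach (pre' ++ tail) (i + 1) none := by
      simp [pvMach, hd]
    rw [step, ih (fun x hx => h x (by simp [hx])) tail (i + 1)]
    have hlen : (i + 1 + ((pre'.length : Int))) = (i + (((d :: pre').length : Int))) := by
      simp only [List.length_cons]; push_cast; ring
    rw [hlen]

theorem pvMach_dots : ∀ (pre : List String), (∀ x ∈ pre, (x == ".") = true) →
    ∀ (tail : List String), (∀ c r, tail = c :: r → (c == ".") = false) →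
    ∀ (i s : Int),
    pvMach (pre ++ tail) i (some s) =
      (s, (i + (pre.length : Int)) - s) :: pvMach tail (i + (pre.length : Int)) none := by
  intro pre
  induction pre with
  | nil =>
    intro _ tail htail i s
    cases tail with
    | nil => simp [pvMach]
    | cons c r =>
      have hc := htail c r rfl
      simp [pvMach, hc]
  | cons d pre' ih =>
    intro h tail htail i s
    have hd : (d == ".") = true := h d (by simp)
    have step : pvMach ((d :: pre') ++ tail) i (some s) = pvMach (pre' ++ tail) (i + 1) (some s) := by
      simp [pvMach, hd]
    rw [step, ih (fun x hx => h x (by simp [hx])) tail htail (i + 1) s]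
    have hlen : (i + 1 + ((pre'.length : Int))) = (i + (((d :: pre').length : Int))) := by
      simp only [List.length_cons]; push_cast; ring
    rw [hlen]

theorem dropWhile_head_false {α : Type} (p : α → Bool) :
    ∀ (l : List α) (c : α) (r : List α), l.dropWhile p = c :: r → p c = false := by
  intro l
  induction l with
  | nil => intro c r h; simp [List.dropWhile] at h
  | cons a t ih =>
    intro c r h
    by_cases ha : p a = true
    · rw [List.dropWhile_cons_of_pos ha] at h; exact ih c r h
    · rw [List.dropWhile_cons_of_neg (by simpa using ha)] at h
      cases h; simpa using ha

theorem pvAltGo_eq_mach (xs : List String) (off : Int) : pvAltGo xs off = pvMach xs off none := by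
  induction xs, off using pvAltGo.induct with
  | case1 off => simp [pvAltGo, pvMach]
  | case2 off b rest len tail hb ih =>
    have hsplit : rest.takeWhile (· == b) ++ tail = rest := List.takeWhile_append_dropWhile
    have hb' : b = "." := by simpa using hb
    have hpre : ∀ x ∈ rest.takeWhile (· == b), (x == ".") = true := by
      intro x hx
      have := List.mem_takeWhile_imp hx
      have hx' : x = b := by simpa using this
      simp [hx', hb']
    have htail : ∀ c r, tail = c :: r → (c == ".") = false := by
      intro c r hcr
      have := dropWhile_head_false (· == b) rest c r hcr
      have hcb : ¬ c = b := by simpa using this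
      simp [hb'] at hcb ⊢
      exact hcb
    rw [pvAltGo, if_pos hb, ih]
    show (off, len) :: pvMach tail (off + len) none = pvMach (b :: rest) off none
    have : pvMach (b :: rest) off none = pvMach rest (off + 1) (some off) := by
      simp [pvMach, hb]
    rw [this, ← hsplit, pvMach_dots _ hpre tail htail (off + 1) off]
    have hlen : (off + 1 + ((rest.takeWhile (· == b)).length : Int)) = off + len := by
      simp [len]; ring
    rw [hlen]
    simp
  | case3 off b rest len tail hb ih =>
    have hsplit : rest.takeWhile (· == b) ++ tail = rest := List.takeWhile_append_dropWhile
    have hpre : ∀ x ∈ rest.takeWhile (· == b), (x == ".") = false := by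
      intro x hx
      have hx' : x = b := by simpa using List.mem_takeWhile_imp hx
      rw [hx']; simpa using hb
    rw [pvAltGo, if_neg (by simp [hb]), ih]
    show pvMach tail (off + len) none = pvMach (b :: rest) off none
    have : pvMach (b :: rest) off none = pvMach rest (off + 1) none := by
      simp [pvMach, hb]
    rw [this, ← hsplit, pvMach_skip_nondots _ hpre tail (off + 1)]
    have hlen : (off + 1 + ((rest.takeWhile (· == b)).length : Int)) = off + len := by
      simp [len]; ring
    rw [hlen]

-- ===== VERDICT (by name: the statement is the Claim_ definition above) =====
theorem measure_free_spaces_spec : Claim_equal_measure_free_spaces := by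
  intro blocks _
  show measure_free_spaces blocks = measure_free_spaces_alt blocks
  rw [measure_free_spaces_eq_mach, measure_free_spaces_alt, pvAltGo_eq_mach]
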